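/- GENERATED by tools/from_farm_form.py from prooffarm-gif/accepted/DGifDecompressLine.11/Proof.lean (a worked proof of the farm's unit `DGifDecompressLine.11`,
   accepted by the verdict) — do not edit. -/
import Gif.Spec.Units.DGifDecompressLine_11
import Gif.Spec.Proved.DGifDecompressLine_11_Lemmas

open X86 X86.User Asan ProgX.Base ProgX.Base.Spec Gif.Spec

set_option maxRecDepth 4000
set_option maxHeartbeats 4000000

/-- Segment 11 of `DGifDecompressLine` (106E67H … 106EDEH; l.961-967): from `Trace` behind the trace loop, through the guard
`StackPtr >= LZ_MAX_CODE || CrntPrefix > LZ_MAX_CODE`, to the epilogue (`Done`: the checked store of `GifFile->Error`) or, after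
THE TIGHT PUSH `Stack[StackPtr++] = CrntPrefix` (`StackPtr ≤ 4094`: the last byte of `Stack[4095]` is reached), to the head of
the second pop loop (`Pop`). -/
theorem Gif.Spec.Proved.DGifDecompressLine_11_ok : Gif.Spec.DGifDecompressLine_11.Statement := by
  intro Lay hLay μ hμ u₀ hcode h_store1 h_store4 H rest frames F R n m k e ret v hat
  obtain ⟨hbody, hloc, h_r13, h_r15, h_rbx, h_si, h_spv, h_mu⟩ := hat
  -- 1. THE PRELUDE (the same in every segment of this function; Gif/Spec/LzwCarry.lean §2)
  -- the entry state's facts: `he_room`, `he_top`, `he_retAddr`, …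
  have he := hbody.entry
  v_entry he
  -- where gif and pv are, and that LineLen is an `int` (what `v_side` / `u_same` / `u_omega` need to place the stores)
  have hgin := hbody.gif_inside
  have hpin := hbody.pv_inside
  have hn31 : n < 2 ^ 31 := hbody.len_lt
  -- the present state, in the walker's names
  have w_rip := hbody.rip
  have c_rsp : v.reg .rsp = e.reg .rsp - 200 := hbody.rsp
  have w_eq : Mem.EqOn ProgX.Base.L.textLo ProgX.Base.L.textHi u₀.mem v.mem := ProgX.Base.conv_code_eqOn hbody.code
  have hdf : v.flags .df = false := (show abiInv _ from hbody.abi).1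
  have hmx : v.mxcsr &&& 0x1F80 = 0x1F80 := (show abiInv _ from hbody.abi).2
  have hsse := ProgX.Base.sseOK_of_abiInv hbody.abi
  have w_kept : RegsKept [.rsp] v v := RegsKept.refl _ _
  -- 2. THE REGISTERS AND SLOTS THE SEGMENT READS
  -- `ebx` = StackPtr ≤ 4095: `movsxd rbx, ebx` is the register itself (a fact for the walker)
  have hsp31 : (v.reg .rbx).toNat < 2 ^ 31 := by omega
  -- `i` in its spill slot, as a number
  obtain ⟨i, k_i⟩ : ∃ i, v.mem.readLE (e.reg .rsp - 144) 4 = i := ⟨_, rfl⟩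
  rw [k_i] at h_si
  have k_pv : v.mem.readLE (e.reg .rsp - 136) 8 = F.pv := h_spv
  have k_stack : v.mem.readLE (e.reg .rsp - 192) 8 = F.pv + 344 := hloc.s_stack
  have k_line : v.mem.readLE (e.reg .rsp - 152) 8 = (e.reg .rsi).toNat := hbody.s_line
  have k_len : v.mem.readLE (e.reg .rsp - 160) 4 = n := hbody.s_len
  have k_shadow : v.mem.readLE (e.reg .rsp - 128) 8 = ((e.reg .rsp - 120) >>> 3).toNat := hloc.s_shadow
  have k_gif : v.mem.readLE (e.reg .rsp - 168) 8 = F.gif := hbody.s_gif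
  -- 3. THE WALK: both arms of the guard of l.961, up to the two exits
  u_walk hcode [hμ.vendor, Gif.Spec.sext32_small (v.reg .rbx) hsp31]
    until [Gif.L.DGifDecompressLine.at_106f12, Gif.L.DGifDecompressLine.at_10709d]
    span [ProgX.Base.L.textLo, ProgX.Base.L.textHi] side (v_side)
  -- 4. THE CHECK GOALS: the object is live, the access lies inside it
  case check_106ec8 =>
    -- l.963 `GifFile->Error = D_GIF_ERR_IMAGE_DEFECT`: inside gif
    have hun : ShadowUntouched v.mem s_106ec8.mem := by v_untouched
    have hl : LiveIn (H.liveObjs ++ rest) (DGifDecompressLine.framesIn frames e) F.gif 120 :=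
      hbody.ok.gif_live.liveIn rest _ (Nat.le_refl _) (Nat.le_refl _)
    exact hl.accSmall hbody.inv.shadow hun _ 4 (by decide) (by u_omega) (by u_omega)
  case check_106e99 =>
    -- l.967 `Stack[StackPtr++] = CrntPrefix`: inside `Stack[4095]`, by the guard: `StackPtr ≤ 4094`
    have hun : ShadowUntouched v.mem s_106e99.mem := by v_untouched
    have hsp : (v.reg .rbx).toNat < 4095 := Gif.Spec.DGifDecompressLine_11.dl11_guard_false _ hsp31 _ hbr_106e85
    have hl := stackLive hbody.ok.pv_live rest (DGifDecompressLine.framesIn frames e) (v.reg .rbx).toNat hsp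
    simp only [gfield] at hl
    exact hl.accSmall hbody.inv.shadow hun _ 1 (by decide) (by u_omega) (by u_omega)
  -- 5. THE EXITS: `Body` through the segment's stores by `Body.carry`, then the clauses of the exit's assertion one by one
  · -- 0x10709d (l.964, `return GIF_ERROR`): the error exit, `Done`
    -- what was stored: the return address of the check, `gif.Error`
    have hun : ShadowUntouched v.mem s_106ed9.mem := by v_untouched
    have hsame : Mem.SameExcept [⟨(e.reg .rsp).toNat - 208, (e.reg .rsp).toNat - 200⟩, ⟨F.gif + 96, F.gif + 100⟩]
        v.mem s_106ed9.mem := by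
      rw [w_mem]
      u_same
    have habi : (conv u₀).inv s_106ed9 := by v_inv
    obtain ⟨k_body, k_loc, k_mu, k_clear, k_eof⟩ :=
      hbody.carry (cut' := Gif.L.DGifDecompressLine.at_10709d) w_rip w_rsp w_eq habi hun hsame (by dl_scratch)
    -- `Done`: `Body`, the shadow index back in `r15`, `eax = 0`
    refine ReachVia.done (Or.inl ⟨k_body, w_r15, ?_⟩)
    right
    rw [w_rax]
    decide
  · -- 0x106f12 (l.970): the head of the second pop loop, `Pop`
    -- the guard of l.961 was false: `StackPtr ≤ 4094`
    have hsp : (v.reg .rbx).toNat < 4095 := Gif.Spec.DGifDecompressLine_11.dl11_guard_false _ hsp31 _ hbr_106e85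
    -- the values the two spills stored, as numbers
    have e_pv : (UInt64.ofNat F.pv).toNat = F.pv := toNat_ofNat_addr F.pv (by omega)
    rw [e_pv, h_r13] at w_mem
    -- what was stored: the return address of the check, `Stack[StackPtr]`, the two spill slots
    have hun : ShadowUntouched v.mem s_106eb8.mem := by v_untouched
    have hsame : Mem.SameExcept [⟨(e.reg .rsp).toNat - 208, (e.reg .rsp).toNat - 200⟩,
        ⟨(e.reg .rsp).toNat - 144, (e.reg .rsp).toNat - 128⟩, ⟨F.pv + 344, F.pv + 4439⟩] v.mem s_106eb8.mem := by
      rw [w_mem]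
      u_same
    have habi : (conv u₀).inv s_106eb8 := by v_inv
    obtain ⟨k_body, k_loc, k_mu, k_clear, k_eof⟩ :=
      hbody.carry (cut' := Gif.L.DGifDecompressLine.at_106f12) w_rip w_rsp w_eq habi hun hsame (by dl_scratch)
    -- `Pop`: `Body`, `Locals`, then `rbx`, `rbp`, `r14`, `r15`, the two spill slots, the measure
    refine ReachVia.done (Or.inr ⟨k_body, k_loc hloc, ?_, ?_, ?_, w_r15, ?_, ?_, ?_⟩)
    · -- StackPtr + 1 ≤ 4095
      rw [w_rbx, Gif.Spec.lea32_succ _ (by omega)]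
      omega
    · -- i ≤ LineLen
      rw [w_rbp, Gif.Spec.toNat_ofBV_ofNat32 i (by omega)]
      omega
    · -- r14d = LineLen
      rw [w_r14, Gif.Spec.toNat_ofBV_ofNat32 n (by omega)]
    · -- `Private` spilled to [rsp+38H]
      u_read
    · -- `Prefix` spilled to [rsp+40H]
      u_read
    · -- the measure: no store of the segment touched it
      rw [k_mu]
      exact h_mu
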